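-- pv_equiv track=rewrite | github.com/alessandroscoppio/Deep-Learning | log_regr.py | replace_class_on_dataset
-- ===== SOURCE A (Python) =====
-- def replace_class_on_dataset(dataset, class_index):
--     class_mapping = {}
--     unique_count = 0
--     for row in dataset:
--         if not row[class_index] in class_mapping:
--             class_mapping[row[class_index]] = unique_count
--             row[class_index] = unique_count
--             unique_count += 1
--         else:
--             row[class_index] = class_mapping[row[class_index]]
--
--     return dataset
-- ===== SOURCE B (Python) =====
-- def replace_class_on_dataset(dataset, class_index):
--     # Two-pass version: first build the full label -> index table in order of
--     # first appearance, then rewrite every row unconditionally.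
--     class_mapping = {}
--     for row in dataset:
--         v = row[class_index]
--         if v not in class_mapping:
--             class_mapping[v] = len(class_mapping)
--     for row in dataset:
--         row[class_index] = class_mapping[row[class_index]]
--     return dataset
-- ===== Notes on version B (the rewrite author's own statement) =====
-- stated objective: simpler
-- what changed: B splits A's interleaved single pass into two passes: one pass builds the complete label-to-index mapping (value = current dict size), a second pass rewrites every row unconditionally via the finished mapping.
import Mathlib
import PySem

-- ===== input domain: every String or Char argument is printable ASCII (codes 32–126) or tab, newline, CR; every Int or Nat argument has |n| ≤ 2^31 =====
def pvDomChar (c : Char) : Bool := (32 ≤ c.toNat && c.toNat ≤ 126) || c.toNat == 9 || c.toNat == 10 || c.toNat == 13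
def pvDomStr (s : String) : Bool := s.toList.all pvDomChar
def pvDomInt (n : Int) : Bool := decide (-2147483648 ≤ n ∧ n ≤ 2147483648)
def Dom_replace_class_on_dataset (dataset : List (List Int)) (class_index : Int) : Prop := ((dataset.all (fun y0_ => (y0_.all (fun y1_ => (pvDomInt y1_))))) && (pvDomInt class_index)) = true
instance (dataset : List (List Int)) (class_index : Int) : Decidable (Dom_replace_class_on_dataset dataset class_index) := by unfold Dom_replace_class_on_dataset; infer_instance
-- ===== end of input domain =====

-- B is A's single interleaved pass split into two plain passes: build the mapping, then apply it.
-- Equivalence is about the RETURN value; both Pythons mutate the rows of `dataset` in place.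

-- ===== PORT A =====
-- A's loop: carries the mapping and unique_count, rewrites each row as it goes.
def pvGoA (class_index : Int) (m : PySem.Dict Int Int) (c : Int) : List (List Int) → List (List Int)
  | [] => []
  | r :: rs =>
    match PySem.List.pyGet? r class_index with
    | none => r :: pvGoA class_index m c rs      -- Python raises IndexError here; excluded by Pre_
    | some v =>
      if m.contains v then
        PySem.List.pySetD r class_index (m.getD v 0) :: pvGoA class_index m c rs
      else
        PySem.List.pySetD r class_index c :: pvGoA class_index (m.insert v c) (c + 1) rs

def replace_class_on_dataset (dataset : List (List Int)) (class_index : Int) : List (List Int) :=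
  pvGoA class_index PySem.Dict.empty 0 dataset

-- ===== PORT B =====
-- First pass: build the full label -> index mapping (value = current dict size).
def pvBuildMap (class_index : Int) (dataset : List (List Int)) : PySem.Dict Int Int :=
  dataset.foldl (fun m r =>
    match PySem.List.pyGet? r class_index with
    | none => m                                   -- Python raises IndexError here; excluded by Pre_
    | some v => if m.contains v then m else m.insert v (m.size : Int)) PySem.Dict.empty

-- Second pass: rewrite every row unconditionally via the finished mapping.
def replace_class_on_dataset_alt (dataset : List (List Int)) (class_index : Int) : List (List Int) :=
  let m := pvBuildMap class_index dataset
  dataset.map (fun r =>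
    match PySem.List.pyGet? r class_index with
    | none => r
    | some v => PySem.List.pySetD r class_index (m.getD v 0))

-- ===== PRECONDITION & SPEC =====
-- Pre_: class_index is a valid (possibly negative) index into every row; otherwise Python A raises IndexError.
def Pre_replace_class_on_dataset (dataset : List (List Int)) (class_index : Int) : Prop :=
  ∀ r ∈ dataset, PySem.Raise.InRange r.length class_index
instance (dataset : List (List Int)) (class_index : Int) : Decidable (Pre_replace_class_on_dataset dataset class_index) := by unfold Pre_replace_class_on_dataset; infer_instance
def pvWitness_replace_class_on_dataset : List (List Int) × Int := ([[1, 2], [3, 2], [1, 5]], 1)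

def Spec_replace_class_on_dataset (dataset : List (List Int)) (class_index : Int) (out : List (List Int)) : Prop := out = replace_class_on_dataset_alt dataset class_index
instance (dataset : List (List Int)) (class_index : Int) (out : List (List Int)) : Decidable (Spec_replace_class_on_dataset dataset class_index out) := by unfold Spec_replace_class_on_dataset; infer_instance

-- ===== CLAIM (what is proved, stated in full; the proofs are below) =====
def Claim_equal_replace_class_on_dataset : Prop := ∀ (dataset : List (List Int)) (class_index : Int), Dom_replace_class_on_dataset dataset class_index → Pre_replace_class_on_dataset dataset class_index → Spec_replace_class_on_dataset dataset class_index (replace_class_on_dataset dataset class_index)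

-- ===== LEMMAS AND PROOFS =====

-- the step function of B's first-pass fold
def pvStep (class_index : Int) (m : PySem.Dict Int Int) (r : List Int) : PySem.Dict Int Int :=
  match PySem.List.pyGet? r class_index with
  | none => m
  | some v => if m.contains v then m else m.insert v (m.size : Int)

lemma pvBuildMap_eq (class_index : Int) (dataset : List (List Int)) :
    pvBuildMap class_index dataset = dataset.foldl (pvStep class_index) PySem.Dict.empty := rfl

lemma pvStep_contains (ci : Int) (m : PySem.Dict Int Int) (r : List Int) (v : Int)
    (h : m.contains v = true) : (pvStep ci m r).contains v = true := by
  unfold pvStep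
  cases PySem.List.pyGet? r ci with
  | none => exact h
  | some w =>
    by_cases hw : m.contains w = true
    · simp [hw, h]
    · simp [hw, PySem.Dict.contains_insert, h]

lemma pvStep_getD (ci : Int) (m : PySem.Dict Int Int) (r : List Int) (v : Int)
    (h : m.contains v = true) : (pvStep ci m r).getD v 0 = m.getD v 0 := by
  unfold pvStep
  cases PySem.List.pyGet? r ci with
  | none => rfl
  | some w =>
    by_cases hw : m.contains w = true
    · simp [hw]
    · have hne : v ≠ w := by rintro rfl; rw [h] at hw; exact hw rfl
      simp [hw, PySem.Dict.getD_insert, hne]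

lemma pvFold_getD (ci : Int) (rs : List (List Int)) :
    ∀ (m : PySem.Dict Int Int) (v : Int), m.contains v = true →
    (rs.foldl (pvStep ci) m).getD v 0 = m.getD v 0 := by
  induction rs with
  | nil => intro m v _; rfl
  | cons r rs ih =>
    intro m v h
    simp only [List.foldl_cons]
    rw [ih (pvStep ci m r) v (pvStep_contains ci m r v h), pvStep_getD ci m r v h]

-- main invariant: A's loop from (m, |m|) equals mapping the finished fold over the remaining rows
lemma pvMain (ci : Int) (rs : List (List Int)) :
    ∀ (m : PySem.Dict Int Int),
    pvGoA ci m (m.size : Int) rs =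
      rs.map (fun r =>
        match PySem.List.pyGet? r ci with
        | none => r
        | some v => PySem.List.pySetD r ci ((rs.foldl (pvStep ci) m).getD v 0)) := by
  induction rs with
  | nil => intro m; rfl
  | cons r rs ih =>
    intro m
    simp only [List.foldl_cons, List.map_cons, pvGoA]
    have hstep : pvStep ci m r =
        match PySem.List.pyGet? r ci with
        | none => m
        | some v => if m.contains v then m else m.insert v (m.size : Int) := rfl
    cases hg : PySem.List.pyGet? r ci with
    | none =>
      rw [hstep, hg]
      rw [ih m]
    | some v =>
      by_cases hv : m.contains v = true
      · rw [hstep, hg]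
        simp only [hv, if_true]
        congr 1
        · rw [pvFold_getD ci rs m v hv]
        · rw [ih m]
      · rw [hstep, hg]
        simp only [hv, if_false, Bool.false_eq_true]
        have hsize : ((m.insert v (m.size : Int)).size : Int) = (m.size : Int) + 1 := by
          rw [PySem.Dict.size_insert]
          simp [hv]
        have hcont : (m.insert v (m.size : Int)).contains v = true :=
          PySem.Dict.contains_insert_self m v _
        congr 1
        · rw [pvFold_getD ci rs _ v hcont, PySem.Dict.getD_insert_self]
        · rw [← hsize, ih (m.insert v (m.size : Int))]

-- ===== VERDICT (by name: the statement is the Claim_ definition above) =====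
theorem replace_class_on_dataset_spec : Claim_equal_replace_class_on_dataset := by
  intro dataset class_index _ _
  unfold Spec_replace_class_on_dataset replace_class_on_dataset replace_class_on_dataset_alt
  rw [pvBuildMap_eq]
  have h := pvMain class_index dataset PySem.Dict.empty
  simpa using h
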